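-- pv_equiv track=rewrite | github.com/tsinghua-auto4/ct_note | BOJ/2301/23/이경훈_1985_디지털친구.py | isAlmostFriend
-- ===== SOURCE A (Python) =====
-- def isAlmostFriend(x, y): # almostfriend인지 확인
--   set_y = set(y)
--
--   len_x = len(x)
--   temp = x
--
--   for i in range(len_x-1):
--     if temp[i] > 0 and temp[i+1] < 9:
--       temp[i] -= 1
--       temp[i+1] += 1
--
--       if temp[0] != 0 and set(temp) == set_y:
--         return True
--
--       temp[i] += 1
--       temp[i+1] -= 1
--
--     if temp[i] < 9 and temp[i+1] > 0:
--       temp[i] += 1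
--       temp[i+1] -= 1
--
--       if set(temp) == set_y:
--         return True
--
--       temp[i] -= 1
--       temp[i+1] += 1
-- ===== SOURCE B (Python) =====
-- def isAlmostFriend(x, y):
--     # One pass with a value-count dict and a mismatch counter (|support(x) ^ set(y)|),
--     # updated in O(1) per adjacent transfer instead of rebuilding set(temp) each time.
--     sy = set(y)
--     cnt = {}
--     for v in x:
--         cnt[v] = cnt.get(v, 0) + 1
--     mism = 0
--     for v in cnt:
--         if v not in sy:
--             mism += 1
--     for v in sy:
--         if v not in cnt:
--             mism += 1
--     state = [mism]
--
--     def inc(v):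
--         c = cnt.get(v, 0)
--         if c == 0:
--             state[0] += -1 if v in sy else 1
--         cnt[v] = c + 1
--
--     def dec(v):
--         c = cnt.get(v, 0) - 1
--         cnt[v] = c
--         if c == 0:
--             state[0] += 1 if v in sy else -1
--
--     for i in range(len(x) - 1):
--         a, b = x[i], x[i + 1]
--         if a > 0 and b < 9:
--             dec(a); dec(b); inc(a - 1); inc(b + 1)
--             first = a - 1 if i == 0 else x[0]
--             if first != 0 and state[0] == 0:
--                 return True
--             dec(a - 1); dec(b + 1); inc(a); inc(b)
--         if a < 9 and b > 0:
--             dec(a); dec(b); inc(a + 1); inc(b - 1)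
--             if state[0] == 0:
--                 return True
--             dec(a + 1); dec(b - 1); inc(a); inc(b)
-- ===== Notes on version B (the rewrite author's own statement) =====
-- stated objective: faster
-- what changed: B keeps a value-count dict and a mismatch counter |support(x) ^ set(y)|, updating them in O(1) per adjacent transfer and per restore, instead of A's rebuilding of set(temp) (an O(n) scan) inside every loop iteration.
import Mathlib
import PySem

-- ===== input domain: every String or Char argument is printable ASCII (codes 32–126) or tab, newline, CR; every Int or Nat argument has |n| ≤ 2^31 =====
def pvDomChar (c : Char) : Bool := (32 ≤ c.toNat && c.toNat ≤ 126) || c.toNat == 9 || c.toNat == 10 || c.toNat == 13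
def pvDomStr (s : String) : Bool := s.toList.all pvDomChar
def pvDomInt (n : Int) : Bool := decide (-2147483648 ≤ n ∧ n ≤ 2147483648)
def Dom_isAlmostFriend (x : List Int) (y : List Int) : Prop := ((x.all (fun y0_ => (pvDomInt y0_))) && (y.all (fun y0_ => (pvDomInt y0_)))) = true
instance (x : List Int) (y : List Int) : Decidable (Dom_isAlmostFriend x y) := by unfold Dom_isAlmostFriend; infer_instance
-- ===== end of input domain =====

-- B replaces A's per-step rebuild of set(temp) by a value-count dict plus a mismatch
-- counter updated in O(1) per adjacent transfer (objective: faster, asymptotic).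
-- A mutates its argument x in place when it returns True; equivalence here is about the
-- RETURN value only (B never mutates x).

-- ===== PORT A =====
-- second 'if' block of A's loop body: none = 'return True', some t = continue with temp t
def aIter2 (set_y : PySem.Set Int) (temp : List Int) (i : Int) : Option (List Int) :=
  if PySem.List.pyGetD temp i 0 < 9 ∧ PySem.List.pyGetD temp (i+1) 0 > 0 then
    let t1 := PySem.List.pySetD temp i (PySem.List.pyGetD temp i 0 + 1)
    let t2 := PySem.List.pySetD t1 (i+1) (PySem.List.pyGetD t1 (i+1) 0 - 1)
    if PySem.Set.equal (PySem.Set.ofList t2) set_y then none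
    else
      let t3 := PySem.List.pySetD t2 i (PySem.List.pyGetD t2 i 0 - 1)
      let t4 := PySem.List.pySetD t3 (i+1) (PySem.List.pyGetD t3 (i+1) 0 + 1)
      some t4
  else some temp

-- first 'if' block of A's loop body, falling through to the second
def aIter (set_y : PySem.Set Int) (temp : List Int) (i : Int) : Option (List Int) :=
  if PySem.List.pyGetD temp i 0 > 0 ∧ PySem.List.pyGetD temp (i+1) 0 < 9 then
    let t1 := PySem.List.pySetD temp i (PySem.List.pyGetD temp i 0 - 1)
    let t2 := PySem.List.pySetD t1 (i+1) (PySem.List.pyGetD t1 (i+1) 0 + 1)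
    if PySem.List.pyGetD t2 0 0 ≠ 0 ∧ PySem.Set.equal (PySem.Set.ofList t2) set_y then none
    else
      let t3 := PySem.List.pySetD t2 i (PySem.List.pyGetD t2 i 0 + 1)
      let t4 := PySem.List.pySetD t3 (i+1) (PySem.List.pyGetD t3 (i+1) 0 - 1)
      aIter2 set_y t4 i
  else aIter2 set_y temp i

def aLoop (set_y : PySem.Set Int) : List Int → List Int → Option Bool
  | _temp, [] => none
  | temp, i :: rest =>
    match aIter set_y temp i with
    | none => some true
    | some t => aLoop set_y t rest

def isAlmostFriend (x : List Int) (y : List Int) : Option Bool :=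
  let set_y := PySem.Set.ofList y
  let len_x : Int := x.length
  let temp := x
  aLoop set_y temp (PySem.List.pyRange 0 (len_x - 1) 1)

-- ===== PORT B =====
-- state = (cnt, mism) : the count dict and the mismatch counter
def bInc (sy : PySem.Set Int) (st : PySem.Dict Int Int × Int) (v : Int) : PySem.Dict Int Int × Int :=
  let c := st.1.getD v 0
  let m := if c = 0 then (if PySem.Set.contains sy v then st.2 - 1 else st.2 + 1) else st.2
  (st.1.insert v (c + 1), m)

def bDec (sy : PySem.Set Int) (st : PySem.Dict Int Int × Int) (v : Int) : PySem.Dict Int Int × Int :=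
  let c := st.1.getD v 0 - 1
  let d := st.1.insert v c
  let m := if c = 0 then (if PySem.Set.contains sy v then st.2 + 1 else st.2 - 1) else st.2
  (d, m)

-- second 'if' block of B's loop body: none = 'return True', some st = continue
def bIter2 (sy : PySem.Set Int) (st : PySem.Dict Int Int × Int) (a b : Int) :
    Option (PySem.Dict Int Int × Int) :=
  if a < 9 ∧ b > 0 then
    let st1 := bInc sy (bInc sy (bDec sy (bDec sy st a) b) (a + 1)) (b - 1)
    if st1.2 = 0 then none
    else some (bInc sy (bInc sy (bDec sy (bDec sy st1 (a + 1)) (b - 1)) a) b)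
  else some st

-- first 'if' block of B's loop body, falling through to the second
def bIter (sy : PySem.Set Int) (x : List Int) (st : PySem.Dict Int Int × Int) (i a b : Int) :
    Option (PySem.Dict Int Int × Int) :=
  if a > 0 ∧ b < 9 then
    let st1 := bInc sy (bInc sy (bDec sy (bDec sy st a) b) (a - 1)) (b + 1)
    let first := if i = 0 then a - 1 else PySem.List.pyGetD x 0 0
    if first ≠ 0 ∧ st1.2 = 0 then none
    else bIter2 sy (bInc sy (bInc sy (bDec sy (bDec sy st1 (a - 1)) (b + 1)) a) b) a b
  else bIter2 sy st a b

def bLoop (sy : PySem.Set Int) (x : List Int) : PySem.Dict Int Int × Int → List Int → Option Bool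
  | _st, [] => none
  | st, i :: rest =>
    let a := PySem.List.pyGetD x i 0
    let b := PySem.List.pyGetD x (i+1) 0
    match bIter sy x st i a b with
    | none => some true
    | some st' => bLoop sy x st' rest

def isAlmostFriend_alt (x : List Int) (y : List Int) : Option Bool :=
  let sy := PySem.Set.ofList y
  let cnt := x.foldl (fun d v => d.insert v (d.getD v 0 + 1)) PySem.Dict.empty
  let mism :=
    cnt.keys.foldl (fun m v => if !(PySem.Set.contains sy v) then m + 1 else m) (0 : Int)
    + sy.foldl (fun m v => if !(cnt.contains v) then m + 1 else m) (0 : Int)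
  bLoop sy x (cnt, mism) (PySem.List.pyRange 0 ((x.length : Int) - 1) 1)

-- ===== PRECONDITION & SPEC =====
def Spec_isAlmostFriend (x : List Int) (y : List Int) (out : Option Bool) : Prop := out = isAlmostFriend_alt x y
instance (x : List Int) (y : List Int) (out : Option Bool) : Decidable (Spec_isAlmostFriend x y out) := by unfold Spec_isAlmostFriend; infer_instance

-- ===== CLAIM (what is proved, stated in full; the proofs are below) =====
def Claim_equal_isAlmostFriend : Prop := ∀ (x : List Int) (y : List Int), Dom_isAlmostFriend x y → Spec_isAlmostFriend x y (isAlmostFriend x y)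


-- ===== LEMMAS AND PROOFS =====

-- mismatch measure: |support(t) ^ set(y)| counted inside the fixed universe U
def Mm (y U t : List Int) : Int :=
  (U.countP (fun v => decide (v ∈ t) != decide (v ∈ y)) : Int)

-- the B state (cnt, mism) represents the multiset t
def InvB (y U t : List Int) (st : PySem.Dict Int Int × Int) : Prop :=
  (∀ v : Int, st.1.getD v 0 = (t.count v : Int)) ∧ st.2 = Mm y U t

-- universe: every value any candidate list can contain
def Uof (x y : List Int) : List Int :=
  PySem.Set.ofList (y ++ x ++ x.map (fun v => v - 1) ++ x.map (fun v => v + 1))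

theorem nodup_Uof (x y : List Int) : (Uof x y).Nodup := PySem.Set.nodup_ofList _

theorem mem_Uof {x y : List Int} {v : Int} :
    v ∈ Uof x y ↔ v ∈ y ∨ v ∈ x ∨ v + 1 ∈ x ∨ v - 1 ∈ x := by
  simp only [Uof, PySem.Set.mem_ofList, List.mem_append, List.mem_map]
  constructor
  · rintro (((h | h) | ⟨u, hu, rfl⟩) | ⟨u, hu, rfl⟩)
    · exact Or.inl h
    · exact Or.inr (Or.inl h)
    · refine Or.inr (Or.inr (Or.inl ?_)); simpa using hu
    · refine Or.inr (Or.inr (Or.inr ?_)); simpa using hu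
  · rintro (h | h | h | h)
    · exact Or.inl (Or.inl (Or.inl h))
    · exact Or.inl (Or.inl (Or.inr h))
    · exact Or.inl (Or.inr ⟨v + 1, h, by ring⟩)
    · exact Or.inr ⟨v - 1, h, by ring⟩

theorem x_sub_Uof {x y : List Int} : ∀ v ∈ x, v ∈ Uof x y :=
  fun _ hv => mem_Uof.mpr (Or.inr (Or.inl hv))

theorem y_sub_Uof {x y : List Int} : ∀ v ∈ y, v ∈ Uof x y :=
  fun _ hv => mem_Uof.mpr (Or.inl hv)

-- countP changes only through the single point w of a nodup list
theorem countP_point {U : List Int} (hU : U.Nodup) {w : Int} (hw : w ∈ U) (p q : Int → Bool)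
    (h : ∀ v ∈ U, v ≠ w → p v = q v) :
    (U.countP p : Int) =
      (U.countP q : Int) + (if p w then 1 else 0) - (if q w then 1 else 0) := by
  induction U with
  | nil => simp at hw
  | cons u us ih =>
    rcases List.nodup_cons.mp hU with ⟨hu, hus⟩
    rcases List.mem_cons.mp hw with rfl | hwus
    · have hpq : us.countP p = us.countP q :=
        List.countP_congr (fun v hv => by rw [h v (List.mem_cons_of_mem _ hv) (fun e => hu (e ▸ hv))])
      simp only [List.countP_cons, hpq]
      split_ifs <;> push_cast <;> omega
    · have huw : u ≠ w := fun e => hu (e ▸ hwus)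
      have hih := ih hus hwus (fun v hv hvw => h v (List.mem_cons_of_mem _ hv) hvw)
      have hpu : p u = q u := h u (List.mem_cons_self) huw
      simp only [List.countP_cons, hpu]
      split_ifs at hih ⊢ <;> push_cast at hih ⊢ <;> omega

theorem countP_xor_split (U : List Int) (f g : Int → Bool) :
    U.countP (fun v => f v != g v) =
      U.countP (fun v => f v && !g v) + U.countP (fun v => !f v && g v) := by
  induction U with
  | nil => rfl
  | cons u us ih =>
    simp only [List.countP_cons, ih]
    cases hf : f u <;> cases hg : g u <;> simp <;> omega

-- two nodup lists enumerating the same subset have the same count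
theorem countP_nodup_eq {U S : List Int} (hU : U.Nodup) (hS : S.Nodup) (p q : Int → Bool)
    (h : ∀ v, (v ∈ U ∧ p v = true) ↔ (v ∈ S ∧ q v = true)) : U.countP p = S.countP q := by
  rw [List.countP_eq_length_filter, List.countP_eq_length_filter]
  apply List.Perm.length_eq
  rw [List.perm_ext_iff_of_nodup (hU.filter p) (hS.filter q)]
  intro v
  simp only [List.mem_filter]
  exact h v

theorem Mm_congr {y U t t' : List Int} (h : ∀ v : Int, v ∈ t ↔ v ∈ t') :
    Mm y U t = Mm y U t' := by
  unfold Mm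
  congr 1
  apply List.countP_congr
  intro v _
  simp [h v]

theorem Mm_cons {y U t : List Int} (hU : U.Nodup) {w : Int} (hw : w ∈ U) :
    Mm y U (w :: t) = Mm y U t + (if w ∈ t then 0 else if w ∈ y then -1 else 1) := by
  unfold Mm
  rw [countP_point hU hw (fun v => decide (v ∈ (w :: t)) != decide (v ∈ y))
        (fun v => decide (v ∈ t) != decide (v ∈ y))
        (fun v _ hvw => by simp [List.mem_cons, hvw])]
  by_cases h1 : w ∈ t <;> by_cases h2 : w ∈ y <;> simp [h1, h2] <;> ring

theorem Mm_erase {y U t : List Int} (hU : U.Nodup) {w : Int} (hw : w ∈ U) (hwt : w ∈ t) :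
    Mm y U (t.erase w) = Mm y U t + (if 2 ≤ t.count w then 0 else if w ∈ y then 1 else -1) := by
  unfold Mm
  rw [countP_point hU hw (fun v => decide (v ∈ t.erase w) != decide (v ∈ y))
        (fun v => decide (v ∈ t) != decide (v ∈ y))
        (fun v _ hvw => by simp [List.mem_erase_of_ne hvw])]
  have hmem : w ∈ t.erase w ↔ 2 ≤ t.count w := by
    rw [← List.count_pos_iff, List.count_erase_self]
    have : 0 < t.count w := List.count_pos_iff.mpr hwt
    omega
  by_cases h1 : 2 ≤ t.count w <;> by_cases h2 : w ∈ y <;>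
    simp [hmem, h1, h2, hwt] <;> ring

theorem Mm_eq_zero_iff {y U t : List Int} (ht : ∀ v ∈ t, v ∈ U) (hy : ∀ v ∈ y, v ∈ U) :
    (Mm y U t = 0) ↔
      PySem.Set.equal (PySem.Set.ofList t) (PySem.Set.ofList y) = true := by
  unfold Mm
  rw [PySem.Set.equal_iff]
  constructor
  · intro h v
    have h0 : U.countP (fun v => decide (v ∈ t) != decide (v ∈ y)) = 0 := by exact_mod_cast h
    rw [List.countP_eq_zero] at h0
    simp only [PySem.Set.mem_ofList]
    by_cases hvt : v ∈ t
    · have := h0 v (ht v hvt); simp [hvt] at this; simp [hvt, this]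
    · by_cases hvy : v ∈ y
      · have := h0 v (hy v hvy); simp [hvt, hvy] at this
      · simp [hvt, hvy]
  · intro h
    have h0 : U.countP (fun v => decide (v ∈ t) != decide (v ∈ y)) = 0 := by
      rw [List.countP_eq_zero]
      intro v _
      have hv := h v
      simp only [PySem.Set.mem_ofList] at hv
      by_cases hvt : v ∈ t
      · simp [hvt, hv.mp hvt]
      · have : v ∉ y := fun hvy => hvt (hv.mpr hvy)
        simp [hvt, this]
    exact_mod_cast h0

-- counts under a single list.set (no Nat subtraction)
theorem count_set_nat (l : List Int) (k : Nat) (hk : k < l.length) (a v : Int) :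
    (l.set k a).count v + (if l[k] = v then 1 else 0) = l.count v + (if a = v then 1 else 0) := by
  induction l generalizing k with
  | nil => simp at hk
  | cons h t ih =>
    cases k with
    | zero =>
      simp only [List.set_cons_zero, List.count_cons, List.getElem_cons_zero, beq_iff_eq]
      split_ifs <;> omega
    | succ k =>
      have hk' : k < t.length := by simpa using hk
      have := ih k hk'
      simp only [List.set_cons_succ, List.count_cons, List.getElem_cons_succ, beq_iff_eq]
      split_ifs at this ⊢ <;> omega

theorem two_le_count_dup (l : List Int) (k : Nat) (h : k + 1 < l.length)
    (he : l[k]'(by omega) = l[k + 1]) : 2 ≤ l.count (l[k]'(by omega)) := by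
  have h1 : l[k]'(by omega) :: l.drop (k + 1) = l.drop k := List.getElem_cons_drop (by omega)
  have h2 : l[k + 1] :: l.drop (k + 2) = l.drop (k + 1) := List.getElem_cons_drop h
  have hs : (l.drop k).Sublist l := List.drop_sublist k l
  have hle := hs.count_le (l[k]'(by omega))
  rw [← h1, ← h2] at hle
  simp only [List.count_cons, beq_iff_eq, ← he] at hle
  simp at hle
  omega

theorem mem_erase_pair (x : List Int) (k : Nat) (hk : k + 1 < x.length) :
    x[k + 1] ∈ x.erase (x[k]'(by omega)) := by
  by_cases h : x[k]'(by omega) = x[k + 1]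
  · rw [← List.count_pos_iff, ← h, List.count_erase_self]
    have := two_le_count_dup x k hk h
    omega
  · exact (List.mem_erase_of_ne (Ne.symm h)).mpr (List.getElem_mem _)

theorem mem_erase_second (b' a' : Int) (r : List Int) : b' ∈ (b' :: a' :: r).erase a' := by
  by_cases h : a' = b'
  · subst h
    simp [List.erase_cons]
  · simp [List.erase_cons, Ne.symm h, h]

-- dict/mismatch step lemmas
theorem bInc_inv {y U t : List Int} {st : PySem.Dict Int Int × Int} (hU : U.Nodup)
    (hst : InvB y U t st) {w : Int} (hw : w ∈ U) :
    InvB y U (w :: t) (bInc (PySem.Set.ofList y) st w) := by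
  obtain ⟨hc, hm⟩ := hst
  have hcw := hc w
  have hcont : (PySem.Set.contains (PySem.Set.ofList y) w = true) ↔ w ∈ y := by
    rw [PySem.Set.contains_iff, PySem.Set.mem_ofList]
  have hmem : st.1.getD w 0 = 0 ↔ w ∉ t := by
    rw [hcw]
    simp [List.count_eq_zero]
  constructor
  · intro v
    show (st.1.insert w (st.1.getD w 0 + 1)).getD v 0 = _
    rw [PySem.Dict.getD_insert]
    by_cases hv : v = w
    · subst hv
      simp only [if_pos rfl, List.count_cons, hcw]
      push_cast
      simp
    · have hv' : ¬ (w = v) := fun e => hv e.symm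
      simp only [if_neg hv, hc v, List.count_cons, beq_iff_eq, hv', if_false]
      simp [hv']
  · show (if st.1.getD w 0 = 0 then _ else _) = _
    rw [Mm_cons hU hw]
    by_cases hwt : w ∈ t
    · rw [if_neg (by simp [hmem, hwt]), hm, if_pos hwt]
      ring
    · rw [if_pos (hmem.mpr hwt), if_neg hwt]
      by_cases hwy : w ∈ y
      · rw [if_pos (hcont.mpr hwy), hm, if_pos hwy]
        ring
      · rw [if_neg (fun hh => hwy (hcont.mp hh)), hm, if_neg hwy]

theorem bDec_inv {y U t : List Int} {st : PySem.Dict Int Int × Int} (hU : U.Nodup)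
    (hst : InvB y U t st) {w : Int} (hw : w ∈ U) (hwt : w ∈ t) :
    InvB y U (t.erase w) (bDec (PySem.Set.ofList y) st w) := by
  obtain ⟨hc, hm⟩ := hst
  have hcw := hc w
  have hpos : 0 < t.count w := List.count_pos_iff.mpr hwt
  have hcont : (PySem.Set.contains (PySem.Set.ofList y) w = true) ↔ w ∈ y := by
    rw [PySem.Set.contains_iff, PySem.Set.mem_ofList]
  have hiff : st.1.getD w 0 - 1 = 0 ↔ ¬ 2 ≤ t.count w := by
    rw [hcw]
    omega
  constructor
  · intro v
    show (st.1.insert w (st.1.getD w 0 - 1)).getD v 0 = _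
    rw [PySem.Dict.getD_insert]
    by_cases hv : v = w
    · subst hv
      rw [hcw, List.count_erase_self]
      omega
    · rw [if_neg hv, hc v, List.count_erase_of_ne hv]
  · show (if st.1.getD w 0 - 1 = 0 then _ else _) = _
    rw [Mm_erase hU hw hwt]
    by_cases h2c : 2 ≤ t.count w
    · rw [if_neg (by simp [hiff, h2c]), hm, if_pos h2c]
      ring
    · rw [if_pos (hiff.mpr h2c), if_neg h2c]
      by_cases hwy : w ∈ y
      · rw [if_pos (hcont.mpr hwy), hm, if_pos hwy]
      · rw [if_neg (fun hh => hwy (hcont.mp hh)), hm, if_neg hwy]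
        ring

theorem InvB_congr {y U t t' : List Int} {st : PySem.Dict Int Int × Int}
    (h : ∀ v : Int, t.count v = t'.count v) (hst : InvB y U t st) : InvB y U t' st := by
  obtain ⟨hc, hm⟩ := hst
  refine ⟨fun v => by rw [hc v, h v], ?_⟩
  rw [hm]
  exact Mm_congr (fun v => by rw [← List.count_pos_iff, ← List.count_pos_iff, h v])

-- the four-step dec/dec/inc/inc chain of B's port, as one invariant step
theorem bChain_inv {y U t : List Int} {st : PySem.Dict Int Int × Int} (hU : U.Nodup)
    (hst : InvB y U t st) {a b a' b' : Int} (htU : ∀ v ∈ t, v ∈ U)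
    (ha : a ∈ t) (hb : b ∈ t.erase a) (ha' : a' ∈ U) (hb' : b' ∈ U) :
    InvB y U (b' :: a' :: ((t.erase a).erase b))
      (bInc (PySem.Set.ofList y) (bInc (PySem.Set.ofList y)
        (bDec (PySem.Set.ofList y) (bDec (PySem.Set.ofList y) st a) b) a') b') := by
  have h1 := bDec_inv hU hst (htU a ha) ha
  have h2 := bDec_inv hU h1 (htU b (List.erase_subset hb)) hb
  exact bInc_inv hU (bInc_inv hU h2 ha') hb'

theorem chainT_subset {U t : List Int} {a b a' b' : Int} (htU : ∀ v ∈ t, v ∈ U)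
    (ha' : a' ∈ U) (hb' : b' ∈ U) :
    ∀ v ∈ b' :: a' :: ((t.erase a).erase b), v ∈ U := by
  intro v hv
  rcases List.mem_cons.mp hv with rfl | hv
  · exact hb'
  rcases List.mem_cons.mp hv with rfl | hv
  · exact ha'
  exact htU v (List.erase_subset (List.erase_subset hv))

-- erase of a member removes exactly one occurrence (additive form)
theorem count_erase_nat (l : List Int) {a : Int} (v : Int) (h : a ∈ l) :
    (l.erase a).count v + (if a = v then 1 else 0) = l.count v := by
  rw [List.count_erase]
  simp only [beq_iff_eq]
  have hp : 0 < l.count a := List.count_pos_iff.mpr h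
  by_cases hav : a = v
  · subst hav
    simp
    omega
  · simp only [if_neg hav]
    omega

-- counts of the modified list vs. the cons/erase representation
theorem count_t2_eq_T1 (x : List Int) (k : Nat) (hk : k + 1 < x.length) (u w A B : Int)
    (hA : x[k]'(by omega) = A) (hB : x[k + 1] = B) :
    ∀ v : Int, ((x.set k u).set (k + 1) w).count v =
      (w :: u :: ((x.erase A).erase B)).count v := by
  intro v
  have hklt : k < x.length := by omega
  have ha : A ∈ x := hA ▸ List.getElem_mem _
  have hb : B ∈ x.erase A := by
    rw [← hA, ← hB]
    exact mem_erase_pair x k hk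
  have e1 := count_set_nat x k hklt u v
  rw [hA] at e1
  have e2 := count_set_nat (x.set k u) (k + 1) (by simpa using hk) w v
  have e3 : (x.set k u)[k + 1]'(by simpa using hk) = B := by
    rw [← hB]
    exact List.getElem_set_ne (by omega) _
  rw [e3] at e2
  have f1 := count_erase_nat x v ha
  have f2 := count_erase_nat (x.erase A) v hb
  simp only [List.count_cons, beq_iff_eq]
  split_ifs at e1 e2 f1 f2 ⊢ <;> omega

-- counts after the restore chain come back to the original list
theorem count_T2_eq_x (x : List Int) (k : Nat) (hk : k + 1 < x.length) (u w A B : Int)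
    (hA : x[k]'(by omega) = A) (hB : x[k + 1] = B) :
    ∀ v : Int,
      ((B :: A :: (((w :: u :: ((x.erase A).erase B)).erase u).erase w)).count v)
        = x.count v := by
  intro v
  have ha : A ∈ x := hA ▸ List.getElem_mem _
  have hb : B ∈ x.erase A := by
    rw [← hA, ← hB]
    exact mem_erase_pair x k hk
  have hu : u ∈ (w :: u :: ((x.erase A).erase B)) := by simp
  have hw : w ∈ (w :: u :: ((x.erase A).erase B)).erase u := mem_erase_second w u _
  have f1 := count_erase_nat x v ha
  have f2 := count_erase_nat (x.erase A) v hb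
  have g1 := count_erase_nat (w :: u :: ((x.erase A).erase B)) v hu
  have g2 := count_erase_nat ((w :: u :: ((x.erase A).erase B)).erase u) v hw
  simp only [List.count_cons, beq_iff_eq] at g1 ⊢
  split_ifs at f1 f2 g1 g2 ⊢ <;> omega

-- A's restore puts the list back
theorem set_restore (x : List Int) (k : Nat) (hk : k + 1 < x.length) (u w : Int) :
    ((((x.set k u).set (k + 1) w).set k (x[k]'(by omega))).set (k + 1) x[k + 1]) = x := by
  apply List.ext_getElem (by simp)
  intro i h1 h2
  simp only [List.getElem_set]
  split_ifs with hik hik1 <;> simp_all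



theorem mem_iff_count {t t' : List Int} (h : ∀ v : Int, t.count v = t'.count v) (v : Int) :
    v ∈ t ↔ v ∈ t' := by
  rw [← List.count_pos_iff, ← List.count_pos_iff, h v]

-- the second if-block of the loop body: A and B agree and the invariant is maintained
theorem iter2_eq (x y : List Int) (k : Nat) (hk : k + 1 < x.length)
    (st : PySem.Dict Int Int × Int) (hst : InvB y (Uof x y) x st) :
    (aIter2 (PySem.Set.ofList y) x (k : Int) = none
       ∧ bIter2 (PySem.Set.ofList y) st (x[k]'(by omega)) x[k + 1] = none)
    ∨ (aIter2 (PySem.Set.ofList y) x (k : Int) = some x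
       ∧ ∃ st', bIter2 (PySem.Set.ofList y) st (x[k]'(by omega)) x[k + 1] = some st'
           ∧ InvB y (Uof x y) x st') := by
  have hklt : k < x.length := by omega
  have hcast : ((k : Int) + 1) = ((k + 1 : Nat) : Int) := by push_cast; ring
  have hra : PySem.List.pyGetD x (k : Int) 0 = x[k]'hklt := by
    rw [PySem.List.pyGetD_natCast]
    exact List.getD_eq_getElem x 0 hklt
  have hrb : PySem.List.pyGetD x ((k : Int) + 1) 0 = x[k + 1] := by
    rw [hcast, PySem.List.pyGetD_natCast]
    exact List.getD_eq_getElem x 0 hk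
  simp only [aIter2, bIter2]
  rw [hra, hrb]
  by_cases hcond : x[k]'hklt < 9 ∧ x[k + 1] > 0
  case neg =>
    rw [if_neg hcond, if_neg hcond]
    exact Or.inr ⟨rfl, st, rfl, hst⟩
  case pos =>
    rw [if_pos hcond, if_pos hcond]
    have hs1 : PySem.List.pySetD x (k : Int) (x[k]'hklt + 1) = x.set k (x[k]'hklt + 1) :=
      PySem.List.pySetD_natCast ..
    rw [hs1]
    have hr2 : PySem.List.pyGetD (x.set k (x[k]'hklt + 1)) ((k : Int) + 1) 0 = x[k + 1] := by
      rw [hcast, PySem.List.pyGetD_natCast,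
        List.getD_eq_getElem _ _ (by simpa using hk)]
      exact List.getElem_set_ne (by omega) _
    rw [hr2]
    have hs2 : PySem.List.pySetD (x.set k (x[k]'hklt + 1)) ((k : Int) + 1) (x[k + 1] - 1)
        = (x.set k (x[k]'hklt + 1)).set (k + 1) (x[k + 1] - 1) := by
      rw [hcast]
      exact PySem.List.pySetD_natCast ..
    rw [hs2]
    -- invariant after the transfer chain
    have ha : x[k]'hklt ∈ x := List.getElem_mem _
    have hb : x[k + 1] ∈ x.erase (x[k]'hklt) := mem_erase_pair x k hk
    have haU : x[k]'hklt + 1 ∈ Uof x y :=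
      mem_Uof.mpr (Or.inr (Or.inr (Or.inr (by simpa using ha))))
    have hbU : x[k + 1] - 1 ∈ Uof x y :=
      mem_Uof.mpr (Or.inr (Or.inr (Or.inl (by simpa using List.getElem_mem hk))))
    have hst1 := bChain_inv (nodup_Uof x y) hst x_sub_Uof ha hb haU hbU
    have hcnt := count_t2_eq_T1 x k hk (x[k]'hklt + 1) (x[k + 1] - 1) (x[k]'hklt) x[k + 1] rfl rfl
    have hmemiff := mem_iff_count hcnt
    have hT1U : ∀ v ∈ (x[k + 1] - 1) :: (x[k]'hklt + 1) :: ((x.erase (x[k]'hklt)).erase x[k + 1]),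
        v ∈ Uof x y := chainT_subset x_sub_Uof haU hbU
    have ht2U : ∀ v ∈ (x.set k (x[k]'hklt + 1)).set (k + 1) (x[k + 1] - 1), v ∈ Uof x y :=
      fun v hv => hT1U v ((hmemiff v).mp hv)
    have hzero :
        (bInc (PySem.Set.ofList y) (bInc (PySem.Set.ofList y) (bDec (PySem.Set.ofList y)
            (bDec (PySem.Set.ofList y) st (x[k]'hklt)) x[k + 1]) (x[k]'hklt + 1)) (x[k + 1] - 1)).2 = 0
          ↔ PySem.Set.equal
              (PySem.Set.ofList ((x.set k (x[k]'hklt + 1)).set (k + 1) (x[k + 1] - 1)))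
              (PySem.Set.ofList y) = true := by
      rw [hst1.2, Mm_congr (fun v => ((hmemiff v).symm)),
        Mm_eq_zero_iff ht2U y_sub_Uof]
    by_cases hg : PySem.Set.equal
        (PySem.Set.ofList ((x.set k (x[k]'hklt + 1)).set (k + 1) (x[k + 1] - 1)))
        (PySem.Set.ofList y) = true
    case pos =>
      rw [if_pos hg, if_pos (hzero.mpr hg)]
      exact Or.inl ⟨rfl, rfl⟩
    case neg =>
      rw [if_neg hg, if_neg (fun hh => hg (hzero.mp hh))]
      refine Or.inr ⟨?_, ?_⟩
      · -- A restores the list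
        have hr3 : PySem.List.pyGetD ((x.set k (x[k]'hklt + 1)).set (k + 1) (x[k + 1] - 1))
            (k : Int) 0 = x[k]'hklt + 1 := by
          rw [PySem.List.pyGetD_natCast, List.getD_eq_getElem _ _ (by simpa using hklt)]
          rw [List.getElem_set_ne (by omega)]
          exact List.getElem_set_self (by simpa using hklt)
        rw [hr3]
        have hs3 : PySem.List.pySetD ((x.set k (x[k]'hklt + 1)).set (k + 1) (x[k + 1] - 1))
            (k : Int) (x[k]'hklt + 1 - 1)
            = ((x.set k (x[k]'hklt + 1)).set (k + 1) (x[k + 1] - 1)).set k (x[k]'hklt + 1 - 1) :=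
          PySem.List.pySetD_natCast ..
        rw [hs3]
        have he1 : x[k]'hklt + 1 - 1 = x[k]'hklt := by ring
        rw [he1]
        have hr4 : PySem.List.pyGetD
            (((x.set k (x[k]'hklt + 1)).set (k + 1) (x[k + 1] - 1)).set k (x[k]'hklt))
            ((k : Int) + 1) 0 = x[k + 1] - 1 := by
          rw [hcast, PySem.List.pyGetD_natCast, List.getD_eq_getElem _ _ (by simpa using hk)]
          rw [List.getElem_set_ne (by omega)]
          exact List.getElem_set_self (by simpa using hk)
        rw [hr4]
        have hs4 : PySem.List.pySetD
            (((x.set k (x[k]'hklt + 1)).set (k + 1) (x[k + 1] - 1)).set k (x[k]'hklt))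
            ((k : Int) + 1) (x[k + 1] - 1 + 1)
            = (((x.set k (x[k]'hklt + 1)).set (k + 1) (x[k + 1] - 1)).set k (x[k]'hklt)).set (k + 1)
                (x[k + 1] - 1 + 1) := by
          rw [hcast]
          exact PySem.List.pySetD_natCast ..
        rw [hs4]
        have he2 : x[k + 1] - 1 + 1 = x[k + 1] := by ring
        rw [he2, set_restore x k hk]
      · -- B restores the invariant
        have hu1 : x[k]'hklt + 1
            ∈ (x[k + 1] - 1) :: (x[k]'hklt + 1) :: ((x.erase (x[k]'hklt)).erase x[k + 1]) := by
          simp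
        have hw1 : x[k + 1] - 1
            ∈ ((x[k + 1] - 1) :: (x[k]'hklt + 1) :: ((x.erase (x[k]'hklt)).erase x[k + 1])).erase
                (x[k]'hklt + 1) := mem_erase_second _ _ _
        have hst2 := bChain_inv (nodup_Uof x y) hst1 hT1U hu1 hw1
          (x_sub_Uof _ ha) (x_sub_Uof _ (List.getElem_mem hk))
        have hx2 := count_T2_eq_x x k hk (x[k]'hklt + 1) (x[k + 1] - 1) (x[k]'hklt) x[k + 1] rfl rfl
        exact ⟨_, rfl, InvB_congr hx2 hst2⟩


-- the whole loop body: A and B agree and the invariant is maintained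
theorem iter_eq (x y : List Int) (k : Nat) (hk : k + 1 < x.length)
    (st : PySem.Dict Int Int × Int) (hst : InvB y (Uof x y) x st) :
    (aIter (PySem.Set.ofList y) x (k : Int) = none
       ∧ bIter (PySem.Set.ofList y) x st (k : Int) (x[k]'(by omega)) x[k + 1] = none)
    ∨ (aIter (PySem.Set.ofList y) x (k : Int) = some x
       ∧ ∃ st', bIter (PySem.Set.ofList y) x st (k : Int) (x[k]'(by omega)) x[k + 1] = some st'
           ∧ InvB y (Uof x y) x st') := by
  have hklt : k < x.length := by omega
  have hxne : 0 < x.length := by omega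
  have hcast : ((k : Int) + 1) = ((k + 1 : Nat) : Int) := by push_cast; ring
  have hra : PySem.List.pyGetD x (k : Int) 0 = x[k]'hklt := by
    rw [PySem.List.pyGetD_natCast]
    exact List.getD_eq_getElem x 0 hklt
  have hrb : PySem.List.pyGetD x ((k : Int) + 1) 0 = x[k + 1] := by
    rw [hcast, PySem.List.pyGetD_natCast]
    exact List.getD_eq_getElem x 0 hk
  simp only [aIter, bIter]
  rw [hra, hrb]
  by_cases hcond : x[k]'hklt > 0 ∧ x[k + 1] < 9
  case neg =>
    rw [if_neg hcond, if_neg hcond]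
    exact iter2_eq x y k hk st hst
  case pos =>
    rw [if_pos hcond, if_pos hcond]
    have hs1 : PySem.List.pySetD x (k : Int) (x[k]'hklt - 1) = x.set k (x[k]'hklt - 1) :=
      PySem.List.pySetD_natCast ..
    rw [hs1]
    have hr2 : PySem.List.pyGetD (x.set k (x[k]'hklt - 1)) ((k : Int) + 1) 0 = x[k + 1] := by
      rw [hcast, PySem.List.pyGetD_natCast,
        List.getD_eq_getElem _ _ (by simpa using hk)]
      exact List.getElem_set_ne (by omega) _
    rw [hr2]
    have hs2 : PySem.List.pySetD (x.set k (x[k]'hklt - 1)) ((k : Int) + 1) (x[k + 1] + 1)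
        = (x.set k (x[k]'hklt - 1)).set (k + 1) (x[k + 1] + 1) := by
      rw [hcast]
      exact PySem.List.pySetD_natCast ..
    rw [hs2]
    have ha : x[k]'hklt ∈ x := List.getElem_mem _
    have hb : x[k + 1] ∈ x.erase (x[k]'hklt) := mem_erase_pair x k hk
    have haU : x[k]'hklt - 1 ∈ Uof x y :=
      mem_Uof.mpr (Or.inr (Or.inr (Or.inl (by simpa using ha))))
    have hbU : x[k + 1] + 1 ∈ Uof x y :=
      mem_Uof.mpr (Or.inr (Or.inr (Or.inr (by simpa using List.getElem_mem hk))))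
    have hst1 := bChain_inv (nodup_Uof x y) hst x_sub_Uof ha hb haU hbU
    have hcnt := count_t2_eq_T1 x k hk (x[k]'hklt - 1) (x[k + 1] + 1) (x[k]'hklt) x[k + 1] rfl rfl
    have hmemiff := mem_iff_count hcnt
    have hT1U : ∀ v ∈ (x[k + 1] + 1) :: (x[k]'hklt - 1) :: ((x.erase (x[k]'hklt)).erase x[k + 1]),
        v ∈ Uof x y := chainT_subset x_sub_Uof haU hbU
    have ht2U : ∀ v ∈ (x.set k (x[k]'hklt - 1)).set (k + 1) (x[k + 1] + 1), v ∈ Uof x y :=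
      fun v hv => hT1U v ((hmemiff v).mp hv)
    have hzero :
        (bInc (PySem.Set.ofList y) (bInc (PySem.Set.ofList y) (bDec (PySem.Set.ofList y)
            (bDec (PySem.Set.ofList y) st (x[k]'hklt)) x[k + 1]) (x[k]'hklt - 1)) (x[k + 1] + 1)).2 = 0
          ↔ PySem.Set.equal
              (PySem.Set.ofList ((x.set k (x[k]'hklt - 1)).set (k + 1) (x[k + 1] + 1)))
              (PySem.Set.ofList y) = true := by
      rw [hst1.2, Mm_congr (fun v => ((hmemiff v).symm)),
        Mm_eq_zero_iff ht2U y_sub_Uof]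
    -- the first element of the candidate list, and B's 'first'
    have h0A : PySem.List.pyGetD ((x.set k (x[k]'hklt - 1)).set (k + 1) (x[k + 1] + 1)) 0 0
        = (if (k : Int) = 0 then x[k]'hklt - 1 else PySem.List.pyGetD x 0 0) := by
      rw [PySem.List.pyGetD_zero, List.getD_eq_getElem _ _ (by simpa using hxne)]
      rw [List.getElem_set_ne (by omega)]
      by_cases hk0 : k = 0
      · subst hk0
        rw [if_pos (by simp : ((0 : Nat) : Int) = 0)]
        exact List.getElem_set_self (by simpa using hxne)
      · rw [if_neg (by simpa using hk0), List.getElem_set_ne (by omega),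
          PySem.List.pyGetD_zero, List.getD_eq_getElem _ _ hxne]
    have hguard :
        (PySem.List.pyGetD ((x.set k (x[k]'hklt - 1)).set (k + 1) (x[k + 1] + 1)) 0 0 ≠ 0
          ∧ PySem.Set.equal
              (PySem.Set.ofList ((x.set k (x[k]'hklt - 1)).set (k + 1) (x[k + 1] + 1)))
              (PySem.Set.ofList y) = true)
        ↔ ((if (k : Int) = 0 then x[k]'hklt - 1 else PySem.List.pyGetD x 0 0) ≠ 0
          ∧ (bInc (PySem.Set.ofList y) (bInc (PySem.Set.ofList y) (bDec (PySem.Set.ofList y)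
              (bDec (PySem.Set.ofList y) st (x[k]'hklt)) x[k + 1]) (x[k]'hklt - 1)) (x[k + 1] + 1)).2
              = 0) := by
      rw [h0A]
      exact and_congr Iff.rfl hzero.symm
    by_cases hg : PySem.List.pyGetD ((x.set k (x[k]'hklt - 1)).set (k + 1) (x[k + 1] + 1)) 0 0 ≠ 0
        ∧ PySem.Set.equal
            (PySem.Set.ofList ((x.set k (x[k]'hklt - 1)).set (k + 1) (x[k + 1] + 1)))
            (PySem.Set.ofList y) = true
    case pos =>
      rw [if_pos hg, if_pos (hguard.mp hg)]
      exact Or.inl ⟨rfl, rfl⟩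
    case neg =>
      rw [if_neg hg, if_neg (fun hh => hg (hguard.mpr hh))]
      -- A restores the list, then both fall through to the second block
      have hr3 : PySem.List.pyGetD ((x.set k (x[k]'hklt - 1)).set (k + 1) (x[k + 1] + 1))
          (k : Int) 0 = x[k]'hklt - 1 := by
        rw [PySem.List.pyGetD_natCast, List.getD_eq_getElem _ _ (by simpa using hklt)]
        rw [List.getElem_set_ne (by omega)]
        exact List.getElem_set_self (by simpa using hklt)
      rw [hr3]
      have hs3 : PySem.List.pySetD ((x.set k (x[k]'hklt - 1)).set (k + 1) (x[k + 1] + 1))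
          (k : Int) (x[k]'hklt - 1 + 1)
          = ((x.set k (x[k]'hklt - 1)).set (k + 1) (x[k + 1] + 1)).set k (x[k]'hklt - 1 + 1) :=
        PySem.List.pySetD_natCast ..
      rw [hs3]
      have he1 : x[k]'hklt - 1 + 1 = x[k]'hklt := by ring
      rw [he1]
      have hr4 : PySem.List.pyGetD
          (((x.set k (x[k]'hklt - 1)).set (k + 1) (x[k + 1] + 1)).set k (x[k]'hklt))
          ((k : Int) + 1) 0 = x[k + 1] + 1 := by
        rw [hcast, PySem.List.pyGetD_natCast, List.getD_eq_getElem _ _ (by simpa using hk)]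
        rw [List.getElem_set_ne (by omega)]
        exact List.getElem_set_self (by simpa using hk)
      rw [hr4]
      have hs4 : PySem.List.pySetD
          (((x.set k (x[k]'hklt - 1)).set (k + 1) (x[k + 1] + 1)).set k (x[k]'hklt))
          ((k : Int) + 1) (x[k + 1] + 1 - 1)
          = (((x.set k (x[k]'hklt - 1)).set (k + 1) (x[k + 1] + 1)).set k (x[k]'hklt)).set (k + 1)
              (x[k + 1] + 1 - 1) := by
        rw [hcast]
        exact PySem.List.pySetD_natCast ..
      rw [hs4]
      have he2 : x[k + 1] + 1 - 1 = x[k + 1] := by ring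
      rw [he2, set_restore x k hk]
      -- B restores the invariant, then both run the second block
      have hu1 : x[k]'hklt - 1
          ∈ (x[k + 1] + 1) :: (x[k]'hklt - 1) :: ((x.erase (x[k]'hklt)).erase x[k + 1]) := by
        simp
      have hw1 : x[k + 1] + 1
          ∈ ((x[k + 1] + 1) :: (x[k]'hklt - 1) :: ((x.erase (x[k]'hklt)).erase x[k + 1])).erase
              (x[k]'hklt - 1) := mem_erase_second _ _ _
      have hst2 := bChain_inv (nodup_Uof x y) hst1 hT1U hu1 hw1
        (x_sub_Uof _ ha) (x_sub_Uof _ (List.getElem_mem hk))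
      have hx2 := count_T2_eq_x x k hk (x[k]'hklt - 1) (x[k + 1] + 1) (x[k]'hklt) x[k + 1] rfl rfl
      exact iter2_eq x y k hk _ (InvB_congr hx2 hst2)


-- the whole loop
theorem loop_eq (x y : List Int) (is : List Int) :
    ∀ st : PySem.Dict Int Int × Int, InvB y (Uof x y) x st →
      (∀ i ∈ is, 0 ≤ i ∧ i < (x.length : Int) - 1) →
      aLoop (PySem.Set.ofList y) x is = bLoop (PySem.Set.ofList y) x st is := by
  induction is with
  | nil =>
    intro st _ _
    rfl
  | cons i rest ih =>
    intro st hst his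
    obtain ⟨h0, h1⟩ := his i List.mem_cons_self
    have hk : i.toNat + 1 < x.length := by omega
    have hklt : i.toNat < x.length := by omega
    have hik : i = (i.toNat : Int) := (Int.toNat_of_nonneg h0).symm
    simp only [aLoop, bLoop]
    rw [hik]
    have hcast : ((i.toNat : Int) + 1) = ((i.toNat + 1 : Nat) : Int) := by push_cast; ring
    have hra : PySem.List.pyGetD x (i.toNat : Int) 0 = x[i.toNat]'hklt := by
      rw [PySem.List.pyGetD_natCast]
      exact List.getD_eq_getElem x 0 hklt
    have hrb : PySem.List.pyGetD x ((i.toNat : Int) + 1) 0 = x[i.toNat + 1] := by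
      rw [hcast, PySem.List.pyGetD_natCast]
      exact List.getD_eq_getElem x 0 hk
    rw [hra, hrb]
    rcases iter_eq x y i.toNat hk st hst with ⟨hA, hB⟩ | ⟨hA, st', hB, hst'⟩
    · rw [hA, hB]
    · rw [hA, hB]
      exact ih st' hst' (fun j hj => his j (List.mem_cons_of_mem _ hj))

-- the initial dict and mismatch counter of B satisfy the invariant
theorem init_inv (x y : List Int) :
    InvB y (Uof x y) x
      (x.foldl (fun d v => d.insert v (d.getD v 0 + 1)) (PySem.Dict.empty : PySem.Dict Int Int),
        (x.foldl (fun d v => d.insert v (d.getD v 0 + 1)) (PySem.Dict.empty : PySem.Dict Int Int)).keys.foldl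
          (fun m v => if !(PySem.Set.contains (PySem.Set.ofList y) v) then m + 1 else m) (0 : Int)
        + (PySem.Set.ofList y).foldl
            (fun m v =>
              if !((x.foldl (fun d v => d.insert v (d.getD v 0 + 1)) (PySem.Dict.empty : PySem.Dict Int Int)).contains v)
              then m + 1 else m) (0 : Int)) := by
  have hc : x.foldl (fun d v => d.insert v (d.getD v 0 + 1)) (PySem.Dict.empty : PySem.Dict Int Int)
      = PySem.Dict.counter x := PySem.Dict.foldl_insert_getD_add_one_eq_counter x
  have h1 : (Uof x y).countP (fun v => decide (v ∈ x) && !decide (v ∈ y))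
      = (PySem.Set.ofList x).countP
          (fun v => !(PySem.Set.contains (PySem.Set.ofList y) v)) := by
    apply countP_nodup_eq (nodup_Uof x y) (PySem.Set.nodup_ofList x)
    intro v
    simp only [Bool.and_eq_true, Bool.not_eq_true', decide_eq_true_eq, decide_eq_false_iff_not,
      PySem.Set.mem_ofList]
    constructor
    · rintro ⟨_, hx, hy⟩
      refine ⟨hx, ?_⟩
      rw [← Bool.not_eq_true, PySem.Set.contains_iff]
      simpa [PySem.Set.mem_ofList] using hy
    · rintro ⟨hx, hy⟩
      refine ⟨x_sub_Uof v hx, hx, ?_⟩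
      intro hvy
      rw [← Bool.not_eq_true, PySem.Set.contains_iff] at hy
      exact hy (by simpa [PySem.Set.mem_ofList] using hvy)
  have h2 : (Uof x y).countP (fun v => !decide (v ∈ x) && decide (v ∈ y))
      = (PySem.Set.ofList y).countP (fun v => !((PySem.Dict.counter x).contains v)) := by
    apply countP_nodup_eq (nodup_Uof x y) (PySem.Set.nodup_ofList y)
    intro v
    simp only [Bool.and_eq_true, Bool.not_eq_true', decide_eq_true_eq, decide_eq_false_iff_not,
      PySem.Set.mem_ofList, PySem.Dict.contains_counter]
    constructor
    · rintro ⟨_, hx, hy⟩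
      exact ⟨hy, by simpa using hx⟩
    · rintro ⟨hy, hx⟩
      exact ⟨y_sub_Uof v hy, by simpa using hx, hy⟩
  constructor
  · intro v
    show (x.foldl (fun d v => d.insert v (d.getD v 0 + 1)) (PySem.Dict.empty : PySem.Dict Int Int)).getD v 0 = _
    rw [hc]
    exact PySem.Dict.getD_counter x v
  · show _ + _ = Mm y (Uof x y) x
    rw [hc, PySem.Dict.keys_counter, PySem.List.foldl_if_add_one, PySem.List.foldl_if_add_one]
    unfold Mm
    rw [countP_xor_split (Uof x y) (fun v => decide (v ∈ x)) (fun v => decide (v ∈ y)),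
      h1, h2]
    push_cast
    ring

-- ===== VERDICT (by name: the statement is the Claim_ definition above) =====
theorem isAlmostFriend_spec : Claim_equal_isAlmostFriend := by
  unfold Claim_equal_isAlmostFriend
  intro x y _
  unfold Spec_isAlmostFriend
  show isAlmostFriend x y = isAlmostFriend_alt x y
  simp only [isAlmostFriend, isAlmostFriend_alt]
  exact loop_eq x y _ _ (init_inv x y) (fun i hi => by
    rw [PySem.List.mem_pyRange_one] at hi
    exact ⟨hi.1, hi.2⟩)
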